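-- pv_equiv track=rewrite | github.com/arturxz/TCC | CL_ND/vglClNdNot.py | getDir
-- ===== SOURCE A (Python) =====
-- def getDir(filePath):
-- 	size = len(filePath)-1
-- 	bar = -1
-- 	for i in range(0, size):
-- 		if(filePath[i] == '/'):
-- 			bar = i
-- 			i = -1
-- 	return filePath[:bar+1]
-- ===== SOURCE B (Python) =====
-- def getDir(filePath):
--     for i in range(len(filePath) - 2, -1, -1):
--         if filePath[i] == '/':
--             return filePath[:i + 1]
--     return ''
-- ===== Notes on version B (the rewrite author's own statement) =====
-- stated objective: alternative
-- what changed: B scans backwards from index len-2 and returns the prefix at the first slash found (early exit), instead of A's full forward pass that keeps overwriting a last-match variable and slices afterwards.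
import Mathlib
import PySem

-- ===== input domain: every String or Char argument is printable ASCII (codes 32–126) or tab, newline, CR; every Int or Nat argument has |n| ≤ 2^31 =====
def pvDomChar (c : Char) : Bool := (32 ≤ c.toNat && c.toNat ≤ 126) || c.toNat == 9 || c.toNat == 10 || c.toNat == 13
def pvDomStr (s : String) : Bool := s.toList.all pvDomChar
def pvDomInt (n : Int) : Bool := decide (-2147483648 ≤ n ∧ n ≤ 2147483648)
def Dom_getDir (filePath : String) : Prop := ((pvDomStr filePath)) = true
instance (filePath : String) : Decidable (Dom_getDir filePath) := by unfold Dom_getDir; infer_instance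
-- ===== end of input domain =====

-- B scans backwards from index len-2 and returns at the first slash (early exit),
-- instead of A's forward pass that keeps overwriting a last-match index and slices afterwards.

-- ===== PORT A =====
-- forward loop over range(0, len-1) remembering the last slash index `bar`, then slice
def getDir (filePath : String) : String :=
  PySem.Str.slice filePath none (some
    ((PySem.List.pyRange 0 (PySem.Str.len filePath - 1) 1).foldl
      (fun bar i => if PySem.Str.pyGet? filePath i = some '/' then i else bar) (-1) + 1))

-- ===== PORT B =====
-- backward loop: fuel n means "next index to inspect is n-1"; first slash found wins
def getDirAltGo (s : List Char) : Nat → String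
  | 0 => ""
  | n+1 => if s[n]? = some '/' then String.ofList (s.take (n+1)) else getDirAltGo s n

def getDir_alt (filePath : String) : String :=
  getDirAltGo filePath.toList (filePath.toList.length - 1)

-- ===== PRECONDITION & SPEC =====
def Spec_getDir (filePath : String) (out : String) : Prop := out = getDir_alt filePath
instance (filePath : String) (out : String) : Decidable (Spec_getDir filePath out) := by unfold Spec_getDir; infer_instance

-- ===== CLAIM (what is proved, stated in full; the proofs are below) =====
def Claim_equal_getDir : Prop := ∀ (filePath : String), Dom_getDir filePath → Spec_getDir filePath (getDir filePath)

-- ===== LEMMAS AND PROOFS =====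

theorem getDir_key (s : List Char) (n : Nat) :
    String.ofList (PySem.List.slice s none (some
      ((PySem.List.pyRange 0 (n : Int) 1).foldl
        (fun bar i => if s[i.toNat]? = some '/' then i else bar) (-1) + 1)))
    = getDirAltGo s n := by
  induction n with
  | zero =>
      simp [PySem.List.pyRange_one_eq_nil, getDirAltGo]
      have h0 : PySem.List.slice s none (some ((0 : Nat) : Int)) = s.take 0 :=
        PySem.List.slice_to_natCast s 0
      simpa using h0
  | succ n ih =>
      have hsplit : PySem.List.pyRange 0 ((n + 1 : Nat) : Int) 1
          = PySem.List.pyRange 0 (n : Int) 1 ++ [(n : Int)] := by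
        have := PySem.List.pyRange_one_succ_right (a := 0) (b := (n : Int)) (by positivity)
        push_cast
        simpa using this
      rw [hsplit, List.foldl_append]
      simp only [List.foldl_cons, List.foldl_nil, Int.toNat_natCast]
      by_cases h : s[n]? = some '/'
      · have ht : PySem.List.slice s none (some ((n + 1 : Nat) : Int)) = s.take (n + 1) :=
          PySem.List.slice_to_natCast s (n + 1)
        push_cast at ht
        simp [h, getDirAltGo, ht]
      · simp [h, getDirAltGo, ih]

theorem getDir_str_slice (filePath : String) (b : Int) :
    PySem.Str.slice filePath none (some b)
      = String.ofList (PySem.List.slice filePath.toList none (some b)) := by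
  apply String.toList_injective
  simp [PySem.Str.toList_slice, PySem.Chars.slice_eq_listSlice]

theorem getDir_spec' (filePath : String) : getDir filePath = getDir_alt filePath := by
  unfold getDir getDir_alt
  rcases hlen : filePath.toList.length with _ | m
  · -- empty string: size = -1, range empty, bar = -1
    have hsz : (PySem.Str.len filePath - 1 : Int) = -1 := by
      simp [PySem.Str.len_eq, hlen]
    rw [hsz, PySem.List.pyRange_one_eq_nil (by norm_num), getDir_str_slice]
    have h0 : PySem.List.slice filePath.toList none (some ((0 : Nat) : Int))
        = filePath.toList.take 0 := PySem.List.slice_to_natCast filePath.toList 0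
    simp only [List.foldl_nil, neg_add_cancel]
    norm_num at h0
    simp [h0, getDirAltGo]
  · -- nonempty: size = m, rewrite the loop body on the range and use the key lemma
    have hsz : (PySem.Str.len filePath - 1 : Int) = (m : Int) := by
      simp [PySem.Str.len_eq, hlen]
    rw [hsz]
    have hfold :
        (PySem.List.pyRange 0 (m : Int) 1).foldl
          (fun bar i => if PySem.Str.pyGet? filePath i = some '/' then i else bar) (-1)
        = (PySem.List.pyRange 0 (m : Int) 1).foldl
          (fun bar i => if filePath.toList[i.toNat]? = some '/' then i else bar) (-1) := by
      apply PySem.List.foldl_congr_mem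
      intro acc x hx
      have hx0 : 0 ≤ x := ((PySem.List.mem_pyRange_one).1 hx).1
      obtain ⟨k, rfl⟩ := Int.eq_ofNat_of_zero_le hx0
      simp
    rw [hfold, getDir_str_slice]
    simp only [Nat.add_sub_cancel]
    exact getDir_key filePath.toList m

-- ===== VERDICT (by name: the statement is the Claim_ definition above) =====
theorem getDir_spec : Claim_equal_getDir := by
  intro filePath _
  unfold Spec_getDir
  exact getDir_spec' filePath
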